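-- pv_equiv track=rewrite | github.com/cafaray/atco.de-fights | overlappingFindAndReplace.py | overlappingFindAndReplace
-- ===== SOURCE A (Python) =====
-- def overlappingFindAndReplace(text, pattern, replacement):
--     n,l,r=list(text),len(pattern),len(replacement)
--     for x in range(len(text)):
--         if text[x:x+l]==pattern:n[x:x+r]=replacement
--     return ''.join(n)
--
--
--     n=list(text)
--     for x in range(len(text)):
--         if text[x:x+len(pattern)]==pattern:n[x:x+len(replacement)]=replacement
--     return ''.join(n)
-- ===== SOURCE B (Python) =====
-- def overlappingFindAndReplace(text, pattern, replacement):
--     n, r = len(text), len(replacement)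
--     # locate all (overlapping) occurrences of pattern strictly inside text with str.find
--     matches = []
--     x = text.find(pattern)
--     while x != -1 and x < n:
--         matches.append(x)
--         x = text.find(pattern, x + 1)
--     # assemble the result without a mutable buffer: each match writes replacement at
--     # its position and a later (larger) match position wins on overlaps, so a match's
--     # replacement survives only up to the next match position
--     out = []
--     cur = 0
--     for i, x in enumerate(matches):
--         if cur < x:
--             out.append(text[cur:x])
--         nxt = matches[i + 1] if i + 1 < len(matches) else x + r
--         d = nxt - x
--         out.append(replacement if d >= r else replacement[:d])
--         cur = x + r
--     out.append(text[cur:])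
--     return ''.join(out)
-- ===== Notes on version B (the rewrite author's own statement) =====
-- stated objective: faster
-- what changed: A slices and compares text[x:x+l] at every index x and splices the replacement into a mutable list by slice assignment; B locates the occurrences with a str.find scan and then builds the result in one pure left-to-right pass, emitting for each match only the part of the replacement that survives until the next (overriding) match position.
import Mathlib
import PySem

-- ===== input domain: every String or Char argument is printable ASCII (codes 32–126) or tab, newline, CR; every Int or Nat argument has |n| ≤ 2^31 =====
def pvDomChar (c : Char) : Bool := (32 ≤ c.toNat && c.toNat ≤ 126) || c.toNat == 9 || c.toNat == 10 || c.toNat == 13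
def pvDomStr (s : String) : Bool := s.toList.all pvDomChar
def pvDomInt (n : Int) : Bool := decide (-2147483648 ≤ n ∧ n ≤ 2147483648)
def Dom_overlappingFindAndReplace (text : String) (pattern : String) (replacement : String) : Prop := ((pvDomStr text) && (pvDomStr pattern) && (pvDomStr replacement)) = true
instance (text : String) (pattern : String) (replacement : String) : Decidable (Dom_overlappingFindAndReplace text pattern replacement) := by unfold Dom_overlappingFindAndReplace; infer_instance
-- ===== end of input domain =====

-- B replaces A's per-index slice comparison and in-place list-slice assignment by a
-- str.find occurrence scan plus a pure left-to-right assembly of the result (objective: faster).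

-- ===== PORT A =====
-- A: n = list(text); for each x in range(len(text)), if text[x:x+l] == pattern, the
-- list-slice assignment n[x:x+r] = replacement, i.e. n = n[:x] ++ replacement ++ n[x+r:]
-- (exact: here 0 ≤ x and x ≤ x+r, so Python's slice-assignment is this splice); ''.join(n).
def overlappingFindAndReplace (text : String) (pattern : String) (replacement : String) : String :=
  let t := text.toList
  let p := pattern.toList
  let rep := replacement.toList
  let l : Int := p.length
  let r : Int := rep.length
  let res := (PySem.List.pyRange 0 (t.length : Int) 1).foldl
    (fun s x =>
      if PySem.List.slice t (some x) (some (x + l)) = p then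
        PySem.List.slice s none (some x) ++ rep ++ PySem.List.slice s (some (x + r)) none
      else s) t
  String.ofList res

-- ===== PORT B =====
-- Source B's find loop: `x = text.find(pattern); while x != -1 and x < n: matches.append(x);
-- x = text.find(pattern, x + 1)`.  `x != -1` is `0 ≤ x` (str.find returns -1 or ≥ 0).
def pvFindMatchesGo (t p : List Char) : Nat → Int → List Int
  | 0, _ => []
  | fuel + 1, x =>
    if 0 ≤ x ∧ x < (t.length : Int) then
      x :: pvFindMatchesGo t p fuel (PySem.Chars.findFrom t p (x + 1) none)
    else []

-- The loop runs at most len(text) times (the found index strictly increases and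
-- stays below len(text)), so the fuel len(text) + 1 is never exhausted and the
-- fueled loop is exact.
def pvFindMatches (t p : List Char) (x : Int) : List Int :=
  pvFindMatchesGo t p (t.length + 1) x

-- Source B's assembly loop `for i, x in enumerate(matches): …` with the lookahead
-- `nxt = matches[i+1] if i+1 < len(matches) else x + r`, as structural recursion
-- on the match list (the final `out.append(text[cur:])` is the base case).
def pvAssemble (t rep : List Char) (r : Int) (cur : Int) : List Int → List Char
  | [] => PySem.List.slice t (some cur) none
  | x :: rest =>
    let nxt : Int := match rest with | [] => x + r | y :: _ => y
    let d := nxt - x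
    ((if cur < x then PySem.List.slice t (some cur) (some x) else []) ++
      (if r ≤ d then rep else PySem.List.slice rep none (some d))) ++
    pvAssemble t rep r (x + r) rest

def overlappingFindAndReplace_alt (text : String) (pattern : String) (replacement : String) : String :=
  let t := text.toList
  let p := pattern.toList
  let rep := replacement.toList
  let r : Int := rep.length
  let ms := pvFindMatches t p (PySem.Chars.find t p)
  String.ofList (pvAssemble t rep r 0 ms)

-- ===== PRECONDITION & SPEC =====
def Spec_overlappingFindAndReplace (text : String) (pattern : String) (replacement : String) (out : String) : Prop := out = overlappingFindAndReplace_alt text pattern replacement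
instance (text : String) (pattern : String) (replacement : String) (out : String) : Decidable (Spec_overlappingFindAndReplace text pattern replacement out) := by unfold Spec_overlappingFindAndReplace; infer_instance

-- ===== CLAIM (what is proved, stated in full; the proofs are below) =====
def Claim_equal_overlappingFindAndReplace : Prop := ∀ (text : String) (pattern : String) (replacement : String), Dom_overlappingFindAndReplace text pattern replacement → Spec_overlappingFindAndReplace text pattern replacement (overlappingFindAndReplace text pattern replacement)

-- ===== LEMMAS AND PROOFS =====

-- the match positions of pattern p in t (A's loop condition), as naturals
def pvMs (t p : List Char) : List Nat :=
  (List.range t.length).filter (fun x => decide (p <+: t.drop x))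

-- one slice write at position x (the effect of one match), Nat form
def pvWrite (rep : List Char) (x : Nat) (s : List Char) : List Char :=
  s.take x ++ rep ++ s.drop (x + rep.length)

-- Nat-level form of B's assembly
def pvAsmN (t rep : List Char) (cur : Nat) : List Nat → List Char
  | [] => t.drop cur
  | x :: rest =>
    (t.drop cur).take (x - cur) ++
    rep.take (min rep.length (rest.headD (x + rep.length) - x)) ++
    pvAsmN t rep (x + rep.length) rest

lemma pvMs_lt {t p : List Char} {x : Nat} (hx : x ∈ pvMs t p) : x < t.length ∧ p <+: t.drop x := by
  simp [pvMs, List.mem_filter] at hx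
  exact ⟨hx.1, hx.2⟩

lemma pvMs_pairwise (t p : List Char) : (pvMs t p).Pairwise (· < ·) := by
  have h : List.Pairwise (· < ·) (List.range t.length) := List.pairwise_lt_range
  exact h.sublist List.filter_sublist

lemma pvTake_min (l : List Char) (d : Nat) : l.take (min l.length d) = l.take d := by
  rcases Nat.le_total l.length d with h | h
  · rw [min_eq_left h, List.take_of_length_le h, List.take_of_length_le (le_refl _)]
  · rw [min_eq_right h]

-- A's program is the fold of pvWrite over the match positions
lemma pvA_eq_fold (text pattern replacement : String) :
    overlappingFindAndReplace text pattern replacement =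
      String.ofList ((pvMs text.toList pattern.toList).foldl
        (fun s x => pvWrite replacement.toList x s) text.toList) := by
  show String.ofList ((PySem.List.pyRange 0 (text.toList.length : Int) 1).foldl
      (fun s x =>
        if PySem.List.slice text.toList (some x) (some (x + (pattern.toList.length : Int))) = pattern.toList then
          PySem.List.slice s none (some x) ++ replacement.toList ++ PySem.List.slice s (some (x + (replacement.toList.length : Int))) none
        else s) text.toList) = _
  congr 1
  rw [show PySem.List.pyRange 0 (text.toList.length : Int) 1
        = (List.range text.toList.length).map (fun (k : Nat) => (k : Int)) by
      rw [PySem.List.pyRange_one]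
      rw [show ((text.toList.length : Int) - 0).toNat = text.toList.length by omega]
      exact List.map_congr_left (fun a _ => by omega)]
  rw [List.foldl_map]
  have hbody : ∀ (s : List Char) (x : Nat),
      (if PySem.List.slice text.toList (some (x : Int)) (some ((x : Int) + (pattern.toList.length : Int))) = pattern.toList then
        PySem.List.slice s none (some (x : Int)) ++ replacement.toList ++ PySem.List.slice s (some ((x : Int) + (replacement.toList.length : Int))) none
      else s)
      = (if (decide (pattern.toList <+: text.toList.drop x) : Bool) then pvWrite replacement.toList x s else s) := by
    intro s x
    rw [PySem.List.slice_natCast_add, PySem.List.slice_to_natCast]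
    rw [show (x : Int) + (replacement.toList.length : Int) = ((x + replacement.toList.length : Nat) : Int) by push_cast; ring]
    rw [PySem.List.slice_from_natCast]
    by_cases hc : pattern.toList <+: text.toList.drop x
    · rw [if_pos ((List.prefix_iff_eq_take.mp hc).symm), if_pos (by simp [hc])]
      rfl
    · rw [if_neg (fun habs => hc (List.prefix_iff_eq_take.mpr habs.symm)),
          if_neg (by simp [hc])]
  have hmid : (List.range text.toList.length).foldl
      (fun s (x : Nat) => if PySem.List.slice text.toList (some (x : Int)) (some ((x : Int) + (pattern.toList.length : Int))) = pattern.toList then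
          PySem.List.slice s none (some (x : Int)) ++ replacement.toList ++ PySem.List.slice s (some ((x : Int) + (replacement.toList.length : Int))) none
        else s) text.toList
      = (List.range text.toList.length).foldl
          (fun s (x : Nat) => if (decide (pattern.toList <+: text.toList.drop x) : Bool) then pvWrite replacement.toList x s else s) text.toList :=
    PySem.List.foldl_congr_mem _ _ _ _ (fun acc x _ => hbody acc x)
  rw [hmid]
  rw [PySem.List.foldl_if_eq_foldl_filter]
  rfl

-- filter over range splits at the first element ≥ k that satisfies q
lemma pvFilterSplit (q : Nat → Bool) (k f : Nat) (hq : q f = true)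
    (hmin : ∀ j, k ≤ j → j < f → q j = false) (hkf : k ≤ f) :
    ∀ n, f < n →
      (List.range n).filter (fun x => decide (k ≤ x) && q x)
        = f :: (List.range n).filter (fun x => decide (f + 1 ≤ x) && q x) := by
  intro n
  induction n with
  | zero => intro h; omega
  | succ n ih =>
    intro hfn
    rw [List.range_succ, List.filter_append, List.filter_append]
    by_cases hf : f < n
    · rw [ih hf]
      have : (decide (k ≤ n) && q n) = (decide (f + 1 ≤ n) && q n) := by
        have h1 : decide (k ≤ n) = true := by simp; omega
        have h2 : decide (f + 1 ≤ n) = true := by simp; omega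
        rw [h1, h2]
      simp only [List.filter_cons, List.filter_nil]
      rw [this]
      simp [List.cons_append]
    · have hfe : f = n := by omega
      subst hfe
      have hl : (List.range f).filter (fun x => decide (k ≤ x) && q x) = [] := by
        rw [List.filter_eq_nil_iff]
        intro j hj
        rw [List.mem_range] at hj
        by_cases hkj : k ≤ j
        · simp [hmin j hkj hj]
        · simp [hkj]
      have hr : (List.range f).filter (fun x => decide (f + 1 ≤ x) && q x) = [] := by
        rw [List.filter_eq_nil_iff]
        intro j hj
        rw [List.mem_range] at hj
        simp; omega
      rw [hl, hr]
      simp [List.filter_cons, hq]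
      omega

-- B's find loop collects exactly the match positions ≥ k
lemma pvFindMatchesGo_eq (t p : List Char) :
    ∀ (f k : Nat), k ≤ t.length → t.length - k < f →
    pvFindMatchesGo t p f (PySem.Chars.findFrom t p (k : Int) none) =
      ((pvMs t p).filter (fun x => decide (k ≤ x))).map (fun (x : Nat) => (x : Int)) := by
  intro f
  induction f with
  | zero => intro k hk hf; omega
  | succ f ih =>
    intro k hk hf
    rw [PySem.Chars.findFrom_natCast t p k hk]
    by_cases hneg : PySem.Chars.find (t.drop k) p = -1
    · rw [if_pos hneg]
      rw [pvFindMatchesGo]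
      rw [if_neg (by norm_num)]
      have hno : ∀ j, k ≤ j → ¬ p <+: t.drop j := by
        intro j hkj hpre
        have hinf : ¬ p <:+: t.drop k := (PySem.Chars.find_eq_neg_one_iff _ _).mp hneg
        apply hinf
        have : p <+: (t.drop k).drop (j - k) := by
          rw [List.drop_drop, show k + (j - k) = j by omega]
          exact hpre
        have hIn : PySem.Chars.isIn p (t.drop k) = true :=
          (PySem.Chars.exists_prefix_drop_iff_isIn _ _).mp ⟨j - k, this⟩
        exact (PySem.Chars.isIn_iff_infix _ _).mp hIn
      rw [show ((pvMs t p).filter (fun x => decide (k ≤ x))) = [] from ?_]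
      · simp
      · rw [List.filter_eq_nil_iff]
        intro x hx
        have := pvMs_lt hx
        simp only [decide_eq_true_eq]
        intro hkx
        exact hno x hkx this.2
    · rw [if_neg hneg]
      have he0 : 0 ≤ PySem.Chars.find (t.drop k) p := by
        have := PySem.Chars.neg_one_le_find (t.drop k) p
        omega
      have heL : PySem.Chars.find (t.drop k) p ≤ ((t.drop k).length : Int) :=
        PySem.Chars.find_le_length _ _
      set e := PySem.Chars.find (t.drop k) p with hedef
      have hspec := PySem.Chars.find_spec (s := t.drop k) (sub := p) he0
      have hlen : (t.drop k).length = t.length - k := by simp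
      -- fN = the found absolute position
      set fN : Nat := k + e.toNat with hfN
      have hfcast : (k : Int) + e = (fN : Int) := by omega
      by_cases hflt : fN < t.length
      · -- the loop keeps fN and continues from fN + 1
        rw [pvFindMatchesGo]
        rw [if_pos (by constructor <;> omega)]
        have hstep : (k : Int) + e + 1 = ((fN + 1 : Nat) : Int) := by omega
        rw [hstep]
        rw [ih (fN + 1) (by omega) (by omega)]
        -- fN is a match, and nothing in [k, fN) is
        have hfm : p <+: t.drop fN := by
          have h1 := hspec.1
          rw [List.drop_drop] at h1
          rw [show k + (PySem.Chars.find (t.drop k) p).toNat = fN by omega] at h1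
          exact h1
        have hmin : ∀ j, k ≤ j → j < fN → ¬ p <+: t.drop j := by
          intro j hkj hjf hpre
          have hnp : ¬ p <+: (t.drop k).drop (j - k) := hspec.2 (j - k) (by omega)
          apply hnp
          rw [List.drop_drop, show k + (j - k) = j by omega]
          exact hpre
        unfold pvMs
        rw [List.filter_filter, List.filter_filter]
        rw [pvFilterSplit (fun x => decide (p <+: t.drop x)) k fN
              (by simp [hfm]) (by intro j h1 h2; simp [hmin j h1 h2]) (by omega)
              t.length hflt]
        rw [List.map_cons, hfcast]
      · -- found only at/after the end (empty pattern at position n): loop stops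
        rw [pvFindMatchesGo]
        rw [if_neg (by push_neg; intro _; omega)]
        have hmin : ∀ j, k ≤ j → j < t.length → ¬ p <+: t.drop j := by
          intro j hkj hjn hpre
          have hnp : ¬ p <+: (t.drop k).drop (j - k) := hspec.2 (j - k) (by omega)
          apply hnp
          rw [List.drop_drop, show k + (j - k) = j by omega]
          exact hpre
        rw [show ((pvMs t p).filter (fun x => decide (k ≤ x))) = [] from ?_]
        · simp
        · rw [List.filter_eq_nil_iff]
          intro x hx
          have hm := pvMs_lt hx
          simp only [decide_eq_true_eq]
          intro hkx
          exact hmin x hkx hm.1 hm.2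

lemma pvFindMatches_eq (t p : List Char) (k : Nat) (hk : k ≤ t.length) :
    pvFindMatches t p (PySem.Chars.findFrom t p (k : Int) none) =
      ((pvMs t p).filter (fun x => decide (k ≤ x))).map (fun (x : Nat) => (x : Int)) :=
  pvFindMatchesGo_eq t p (t.length + 1) k hk (by omega)

-- B's assembly over cast naturals is its Nat form
lemma pvAssemble_eq (t rep : List Char) :
    ∀ (ms : List Nat) (cur : Nat), List.Pairwise (· < ·) ms →
    pvAssemble t rep (rep.length : Int) (cur : Int) (ms.map (fun (x : Nat) => (x : Int))) =
      pvAsmN t rep cur ms := by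
  intro ms
  induction ms with
  | nil =>
    intro cur _
    simp only [List.map_nil]
    unfold pvAssemble pvAsmN
    rw [PySem.List.slice_from_natCast]
  | cons x rest ih =>
    intro cur hs
    have hs' := (List.pairwise_cons.mp hs).2
    have hxr : ∀ y ∈ rest, x < y := (List.pairwise_cons.mp hs).1
    rw [List.map_cons]
    unfold pvAssemble pvAsmN
    have hpiece1 : (if (cur : Int) < (x : Int) then PySem.List.slice t (some (cur : Int)) (some (x : Int)) else [])
        = (t.drop cur).take (x - cur) := by
      by_cases hcx : cur < x
      · rw [if_pos (by exact_mod_cast hcx), PySem.List.slice_natCast]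
      · rw [if_neg (by exact_mod_cast hcx)]
        rw [show x - cur = 0 by omega, List.take_zero]
    cases rest with
    | nil =>
      simp only [List.map_nil]
      have hd : (x : Int) + (rep.length : Int) - (x : Int) = (rep.length : Int) := by ring
      rw [hpiece1]
      simp only [hd, le_refl, if_pos]
      rw [show ((x : Int) + (rep.length : Int)) = ((x + rep.length : Nat) : Int) by push_cast; ring]
      unfold pvAssemble pvAsmN
      rw [PySem.List.slice_from_natCast]
      simp [List.headD]
    | cons y rest' =>
      simp only [List.map_cons]
      have hxy : x < y := hxr y (List.mem_cons_self)
      have hd : (y : Int) - (x : Int) = ((y - x : Nat) : Int) := by omega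
      have hpiece2 : (if (rep.length : Int) ≤ (y : Int) - (x : Int) then rep
            else PySem.List.slice rep none (some ((y : Int) - (x : Int))))
          = rep.take (min rep.length (y - x)) := by
        by_cases hry : rep.length ≤ y - x
        · rw [if_pos (by omega)]
          rw [min_eq_left hry, List.take_length]
        · rw [if_neg (by omega)]
          rw [hd, PySem.List.slice_to_natCast]
          rw [min_eq_right (by omega)]
      rw [hpiece1, hpiece2]
      rw [show ((x : Int) + (rep.length : Nat)) = ((x + rep.length : Nat) : Int) by push_cast; ring]
      rw [← List.map_cons]
      rw [ih (x + rep.length) hs']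
      simp [List.headD]

-- pushing a write past a fixed prefix
lemma pvWrite_append (rep P S : List Char) (k : Nat) (hP : P.length ≤ k) :
    pvWrite rep k (P ++ S) = P ++ pvWrite rep (k - P.length) S := by
  unfold pvWrite
  rw [List.take_append, List.drop_append]
  rw [List.take_of_length_le hP, List.drop_eq_nil_of_le (by omega : P.length ≤ k + rep.length)]
  rw [show k + rep.length - P.length = k - P.length + rep.length by omega]
  simp [List.append_assoc]

-- appending one further (largest) match to the assembly is one more write
lemma pvAsmN_snoc (t rep : List Char) :
    ∀ (ms : List Nat) (y c x : Nat), List.Pairwise (· < ·) (y :: (ms ++ [x])) →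
      (∀ e ∈ y :: (ms ++ [x]), e ≤ t.length) →
      pvAsmN t rep c (y :: (ms ++ [x])) =
        pvWrite rep (x - min c y) (pvAsmN t rep c (y :: ms)) := by
  intro ms
  induction ms with
  | nil =>
    intro y c x hs hb
    have hyx : y < x := (List.pairwise_cons.mp hs).1 x (by simp)
    have hyt : y ≤ t.length := hb y (by simp)
    simp only [List.nil_append, pvAsmN, List.headD]
    simp only [Nat.add_sub_cancel_left, min_self, List.take_length]
    simp only [List.append_assoc]
    rw [pvWrite_append rep ((t.drop c).take (y - c)) (rep ++ t.drop (y + rep.length))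
        (x - min c y) (by simp [List.length_take]; omega)]
    congr 1
    rw [show x - min c y - ((t.drop c).take (y - c)).length = x - y by
      simp [List.length_take]; omega]
    unfold pvWrite
    rw [List.take_append, List.drop_append]
    rw [List.drop_eq_nil_of_le (by omega : rep.length ≤ x - y + rep.length)]
    rw [← pvTake_min rep (x - y)]
    rw [List.drop_drop]
    rw [show (y + rep.length) + (x - y + rep.length - rep.length) = x + rep.length by omega]
    rw [show x - y - rep.length = x - (y + rep.length) by omega]
    simp [List.append_assoc]
  | cons z ms' ih =>
    intro y c x hs hb
    have hyz : y < z := (List.pairwise_cons.mp hs).1 z (by simp)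
    have hsz : List.Pairwise (· < ·) (z :: (ms' ++ [x])) := (List.pairwise_cons.mp hs).2
    have hzx : z < x := (List.pairwise_cons.mp hsz).1 x (by simp)
    have hyt : y ≤ t.length := hb y (by simp)
    show (t.drop c).take (y - c) ++
          rep.take (min rep.length (z - y)) ++
          pvAsmN t rep (y + rep.length) (z :: (ms' ++ [x]))
        = pvWrite rep (x - min c y)
            ((t.drop c).take (y - c) ++
              rep.take (min rep.length (z - y)) ++
              pvAsmN t rep (y + rep.length) (z :: ms'))
    rw [ih z (y + rep.length) x hsz (fun e he => hb e (List.mem_cons_of_mem _ he))]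
    simp only [List.append_assoc]
    rw [pvWrite_append rep ((t.drop c).take (y - c))
        (rep.take (min rep.length (z - y)) ++ pvAsmN t rep (y + rep.length) (z :: ms'))
        (x - min c y) (by simp [List.length_take]; omega)]
    rw [pvWrite_append rep (rep.take (min rep.length (z - y)))
        (pvAsmN t rep (y + rep.length) (z :: ms'))
        (x - min c y - ((t.drop c).take (y - c)).length) (by simp [List.length_take]; omega)]
    rw [show x - min c y - ((t.drop c).take (y - c)).length - (rep.take (min rep.length (z - y))).length
          = x - min (y + rep.length) z by simp [List.length_take]; omega]

-- the write fold over sorted match positions equals B's assembly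
lemma pvFold_eq_asm (t rep : List Char) :
    ∀ (ms : List Nat), List.Pairwise (· < ·) ms → (∀ e ∈ ms, e ≤ t.length) →
    ms.foldl (fun s x => pvWrite rep x s) t = pvAsmN t rep 0 ms := by
  intro ms
  induction ms using List.reverseRecOn with
  | nil => intro _ _; simp [pvAsmN]
  | append_singleton ms x ih =>
    intro hs hb
    rw [List.foldl_append, List.foldl_cons, List.foldl_nil]
    have hms : List.Pairwise (· < ·) ms := hs.sublist (List.sublist_append_left _ _)
    have hbm : ∀ e ∈ ms, e ≤ t.length := fun e he => hb e (List.mem_append_left _ he)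
    rw [ih hms hbm]
    cases ms with
    | nil =>
      simp [pvAsmN, pvWrite, Nat.add_sub_cancel_left]
    | cons y ms' =>
      simp only [List.cons_append] at hs hb ⊢
      rw [pvAsmN_snoc t rep ms' y 0 x hs hb]
      rw [show x - min 0 y = x by omega]

-- ===== VERDICT (by name: the statement is the Claim_ definition above) =====
theorem overlappingFindAndReplace_spec : Claim_equal_overlappingFindAndReplace := by
  intro text pattern replacement _
  unfold Spec_overlappingFindAndReplace
  rw [pvA_eq_fold]
  show _ = String.ofList (pvAssemble text.toList replacement.toList (replacement.toList.length : Int) 0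
      (pvFindMatches text.toList pattern.toList (PySem.Chars.find text.toList pattern.toList)))
  rw [show PySem.Chars.find text.toList pattern.toList
        = PySem.Chars.findFrom text.toList pattern.toList ((0 : Nat) : Int) none by
      simp]
  rw [pvFindMatches_eq text.toList pattern.toList 0 (Nat.zero_le _)]
  rw [show ((pvMs text.toList pattern.toList).filter (fun x => decide (0 ≤ x)))
        = pvMs text.toList pattern.toList by
      apply List.filter_eq_self.mpr; intro a _; simp]
  have hA := pvAssemble_eq text.toList replacement.toList
      (pvMs text.toList pattern.toList) 0 (pvMs_pairwise _ _)
  rw [Nat.cast_zero] at hA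
  rw [hA]
  rw [pvFold_eq_asm _ _ _ (pvMs_pairwise _ _) (fun e he => le_of_lt (pvMs_lt he).1)]
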